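-- pv_equiv track=rewrite | github.com/ashinno/keylogger | parsers/log_parser.py | _process_keyboard_content
-- ===== SOURCE A (Python) =====
-- def _process_keyboard_content(content: str) -> str:
--     """Process keyboard input content."""
--     try:
--         # Handle special keys
--         special_keys = {
--             '<backspace>': '⌫',
--             '<enter>': '↵',
--             '<tab>': '⇥',
--             '<space>': ' ',
--             '<shift>': '⇧',
--             '<ctrl>': '⌃',
--             '<alt>': '⌥',
--             '<delete>': '⌦'
--         }
--
--         processed = content
--         for key, symbol in special_keys.items():
--             processed = processed.replace(key, symbol)
--
--         return processed
--
--     except Exception: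
--         return content
-- ===== SOURCE B (Python) =====
-- def _process_keyboard_content(content: str) -> str:
--     """Process keyboard input content (single left-to-right scan)."""
--     try:
--         table = {
--             '<backspace>': '\u232b',
--             '<enter>': '\u21b5',
--             '<tab>': '\u21e5',
--             '<space>': ' ',
--             '<shift>': '\u21e7',
--             '<ctrl>': '\u2303',
--             '<alt>': '\u2325',
--             '<delete>': '\u2326',
--         }
--         out = []
--         i = 0
--         n = len(content)
--         while i < n:
--             for key, symbol in table.items():
--                 if content.startswith(key, i):
--                     out.append(symbol)
--                     i += len(key)
--                     break
--             else:
--                 out.append(content[i])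
--                 i += 1
--         return ''.join(out)
--     except Exception:
--         return content
-- ===== Notes on version B (the rewrite author's own statement) =====
-- stated objective: alternative
-- what changed: A rebuilds the whole string eight times, one .replace pass per special key; B makes a single left-to-right scan that, at each position, dispatches on which key (if any) starts there and emits its symbol, never rescanning produced output.
import Mathlib
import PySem

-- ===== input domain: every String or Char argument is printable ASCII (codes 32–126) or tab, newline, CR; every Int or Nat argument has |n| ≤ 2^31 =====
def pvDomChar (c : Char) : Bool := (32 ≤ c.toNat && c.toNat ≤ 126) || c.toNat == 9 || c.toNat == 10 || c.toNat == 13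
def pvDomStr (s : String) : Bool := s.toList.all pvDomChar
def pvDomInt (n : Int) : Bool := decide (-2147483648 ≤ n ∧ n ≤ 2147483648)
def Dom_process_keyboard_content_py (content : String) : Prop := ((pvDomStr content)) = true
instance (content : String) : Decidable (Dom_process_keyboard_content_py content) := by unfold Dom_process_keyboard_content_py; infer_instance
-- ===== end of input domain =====

-- B replaces A's eight sequential full-string .replace passes by ONE left-to-right scan
-- that dispatches on the token starting at the current position (objective: alternative).

-- ===== PORT A =====
-- the dict literal of _process_keyboard_content (dict -> association list, insertion order)
def pvSpecialKeys : List (String × String) :=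
  [("<backspace>", "⌫"), ("<enter>", "↵"), ("<tab>", "⇥"), ("<space>", " "),
   ("<shift>", "⇧"), ("<ctrl>", "⌃"), ("<alt>", "⌥"), ("<delete>", "⌦")]

-- for key, symbol in special_keys.items(): processed = processed.replace(key, symbol)
def process_keyboard_content_py (content : String) : String :=
  pvSpecialKeys.foldl
    (fun processed kv => PySem.Str.replace processed kv.1 kv.2) content

-- ===== PORT B =====
-- same dict literal in Source B (dict -> association list, insertion order)
def pvItemsB : List (String × String) :=
  [("<backspace>", "⌫"), ("<enter>", "↵"), ("<tab>", "⇥"), ("<space>", " "),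
   ("<shift>", "⇧"), ("<ctrl>", "⌃"), ("<alt>", "⌥"), ("<delete>", "⌦")]

theorem pvItemsB_key_len : ∀ kv ∈ pvItemsB, 1 ≤ kv.1.toList.length := by decide

-- the while loop of Source B: at each position try the table keys (content.startswith(key, i));
-- on a hit emit the symbol and jump past the key, else emit the character
def pvScanB : List Char → List Char
  | [] => []
  | c :: t =>
    match h : pvItemsB.find? (fun kv => kv.1.toList.isPrefixOf (c :: t)) with
    | some kv => kv.2.toList ++ pvScanB ((c :: t).drop kv.1.toList.length)
    | none => c :: pvScanB t
termination_by l => l.length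
decreasing_by
  · have hm := pvItemsB_key_len kv (List.mem_of_find?_eq_some h)
    simp only [List.length_drop, List.length_cons]
    omega
  · simp

def process_keyboard_content_py_alt (content : String) : String :=
  String.ofList (pvScanB content.toList)

-- ===== PRECONDITION & SPEC =====
def Spec_process_keyboard_content_py (content : String) (out : String) : Prop := out = process_keyboard_content_py_alt content
instance (content : String) (out : String) : Decidable (Spec_process_keyboard_content_py content out) := by unfold Spec_process_keyboard_content_py; infer_instance

-- ===== CLAIM (what is proved, stated in full; the proofs are below) =====
def Claim_equal_process_keyboard_content_py : Prop := ∀ (content : String), Dom_process_keyboard_content_py content → Spec_process_keyboard_content_py content (process_keyboard_content_py content)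

-- ===== LEMMAS AND PROOFS =====

-- clean structural form of Python's str.replace (for a nonempty pattern)
def pvRepC (old new : List Char) : List Char → List Char
  | [] => []
  | c :: t =>
    if old.isPrefixOf (c :: t) && !old.isEmpty
    then new ++ pvRepC old new ((c :: t).drop old.length)
    else c :: pvRepC old new t
termination_by l => l.length
decreasing_by
  · rename_i hcond
    simp only [Bool.and_eq_true, List.isPrefixOf_iff_prefix, Bool.not_eq_true',
      List.isEmpty_eq_false_iff] at hcond
    have : 1 ≤ old.length := by
      cases old with
      | nil => exact absurd rfl hcond.2
      | cons _ _ => simp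
    simp [List.length_drop]; omega
  · simp

theorem pvRepC_nil (old new : List Char) : pvRepC old new [] = [] := by
  simp [pvRepC]

theorem pvRepC_go_eq (old new : List Char) (hold : old ≠ []) :
    ∀ (fuel : Nat) (l acc : List Char), l.length ≤ fuel →
      PySem.Chars.replace.go old new fuel l acc = acc.reverse ++ pvRepC old new l := by
  intro fuel
  induction fuel with
  | zero =>
    intro l acc hl
    have : l = [] := by cases l <;> simp_all
    subst this
    simp [PySem.Chars.replace.go, pvRepC_nil]
  | succ n ih =>
    intro l acc hl
    cases l with
    | nil => simp [PySem.Chars.replace.go, pvRepC_nil]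
    | cons c t =>
      rw [PySem.Chars.replace.go]
      by_cases hp : old.isPrefixOf (c :: t)
      · have hpre : old <+: c :: t := List.isPrefixOf_iff_prefix.mp hp
        have h1 : 1 ≤ old.length := by
          cases old with
          | nil => exact absurd rfl hold
          | cons _ _ => simp
        have hdrop : ((c :: t).drop old.length).length ≤ n := by
          simp [List.length_drop]
          simp at hl
          omega
        rw [if_pos hp, ih _ _ hdrop]
        rw [pvRepC]
        rw [if_pos (by simp [hp, List.isEmpty_eq_false_iff.mpr hold])]
        simp
      · have ht : t.length ≤ n := by simp at hl; omega
        rw [if_neg hp, ih _ _ ht]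
        rw [pvRepC, if_neg (by simp [hp])]
        simp
theorem pvReplace_eq (l old new : List Char) (hold : old ≠ []) :
    PySem.Chars.replace l old new = pvRepC old new l := by
  rw [PySem.Chars.replace, if_neg (by simp [hold])]
  simpa using pvRepC_go_eq old new hold l.length l [] le_rfl

theorem pvRepC_match {old : List Char} (new l : List Char) (hold : old ≠ []) (h : old <+: l) :
    pvRepC old new l = new ++ pvRepC old new (l.drop old.length) := by
  cases l with
  | nil =>
    cases old with
    | nil => exact absurd rfl hold
    | cons a b => simp at h
  | cons c t =>
    rw [pvRepC, if_pos (by simp [List.isPrefixOf_iff_prefix.mpr h, List.isEmpty_eq_false_iff.mpr hold])]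

theorem pvRepC_nomatch {old : List Char} (new : List Char) {c : Char} {t : List Char}
    (h : ¬ old <+: (c :: t)) :
    pvRepC old new (c :: t) = c :: pvRepC old new t := by
  rw [pvRepC, if_neg (by simp [List.isPrefixOf_iff_prefix, h])]

-- a pattern starting with '<' steps over any '<'-free block unchanged
theorem pvRepC_skip {old : List Char} (new : List Char) (hh : old.head? = some '<') :
    ∀ (pre x : List Char), (∀ c ∈ pre, c ≠ '<') →
      pvRepC old new (pre ++ x) = pre ++ pvRepC old new x := by
  intro pre
  induction pre with
  | nil => simp
  | cons c pre' ih =>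
    intro x hpre
    have hnp : ¬ old <+: (c :: (pre' ++ x)) := by
      intro hp
      cases old with
      | nil => simp at hh
      | cons o os =>
        have h1 : o = '<' := by simpa using hh
        have h2 : o = c := (List.cons_prefix_cons.mp hp).1
        exact hpre c (by simp) (h2 ▸ h1)
    simp only [List.cons_append]
    rw [pvRepC_nomatch new hnp, ih x (fun c hc => hpre c (by simp [hc]))]
theorem pvNot_prefix_append {a b x : List Char} (ha : ¬ a <+: b) (hb : ¬ b <+: a) :
    ¬ a <+: b ++ x := by
  intro h
  by_cases hl : a.length ≤ b.length
  · exact ha (List.prefix_of_prefix_length_le h (List.prefix_append b x) hl)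
  · exact hb (List.prefix_of_prefix_length_le (List.prefix_append b x) h (by omega))

-- a non-matching pattern starting with '<' passes a whole key (no inner '<') unchanged
theorem pvRepC_token {old key : List Char} (new x : List Char) (hh : old.head? = some '<')
    (hkey : key ≠ []) (htl : ∀ c ∈ key.drop 1, c ≠ '<') (h : ¬ old <+: key ++ x) :
    pvRepC old new (key ++ x) = key ++ pvRepC old new x := by
  cases key with
  | nil => exact absurd rfl hkey
  | cons d tl =>
    simp only [List.cons_append]
    rw [pvRepC_nomatch new (by simpa using h)]
    rw [pvRepC_skip new hh tl x (by simpa using htl)]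

-- a '<'-free, new-free prefix of the output was already a prefix of the input
theorem pvRepC_prefix_rev {old new : List Char} (hold : old ≠ []) (hnew : new ≠ []) :
    ∀ (x u : List Char), (∀ c ∈ u, c ∉ new) → u <+: pvRepC old new x → u <+: x := by
  intro x
  induction x with
  | nil => intro u _ h; rw [pvRepC_nil] at h; simpa using h
  | cons c t ih =>
    intro u hu h
    by_cases hp : old <+: (c :: t)
    · rw [pvRepC_match new _ hold hp] at h
      cases u with
      | nil => simp
      | cons a u' =>
        cases new with
        | nil => exact absurd rfl hnew
        | cons b new' =>
          simp only [List.cons_append] at h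
          have hab : a = b := (List.cons_prefix_cons.mp h).1
          exact absurd (by simp [hab] : a ∈ b :: new') (hu a (by simp))
    · rw [pvRepC_nomatch new hp] at h
      cases u with
      | nil => simp
      | cons a u' =>
        obtain ⟨hac, hu'⟩ := List.cons_prefix_cons.mp h
        exact List.cons_prefix_cons.mpr ⟨hac, ih u' (fun c hc => hu c (by simp [hc])) hu'⟩

-- the char-level fold that port A performs
def pvStep (s : List Char) (kv : String × String) : List Char :=
  pvRepC kv.1.toList kv.2.toList s

-- eight facts about the literal table, checked by the kernel
theorem pvFact_key_ne : ∀ kv ∈ pvItemsB, kv.1.toList ≠ [] := by decide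
theorem pvFact_key_head : ∀ kv ∈ pvItemsB, kv.1.toList.head? = some '<' := by decide
theorem pvFact_key_tail : ∀ kv ∈ pvItemsB, ∀ c ∈ kv.1.toList.drop 1, c ≠ '<' := by
  have h : pvItemsB.all (fun kv => (kv.1.toList.drop 1).all (fun c => c != '<')) = true := by decide
  simpa [List.all_eq_true, bne_iff_ne] using h
theorem pvFact_sym_ne : ∀ kv ∈ pvItemsB, kv.2.toList ≠ [] := by decide
theorem pvFact_sym_no_lt : ∀ kv ∈ pvItemsB, ∀ c ∈ kv.2.toList, c ≠ '<' := by
  have h : pvItemsB.all (fun kv => kv.2.toList.all (fun c => c != '<')) = true := by decide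
  simpa [List.all_eq_true, bne_iff_ne] using h
theorem pvFact_cmp : ∀ kv ∈ pvItemsB, ∀ kv' ∈ pvItemsB, kv ≠ kv' → ¬ kv.1.toList <+: kv'.1.toList := by decide
theorem pvFact_cross : ∀ kv ∈ pvItemsB, ∀ kv' ∈ pvItemsB, ∀ c ∈ kv'.1.toList.drop 1, c ∉ kv.2.toList := by
  have h : pvItemsB.all (fun kv => pvItemsB.all (fun kv' =>
      (kv'.1.toList.drop 1).all (fun c => !kv.2.toList.contains c))) = true := by decide
  simpa [List.all_eq_true, List.contains_iff_mem] using h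

-- the whole fold steps over a '<'-free block unchanged
theorem pvFoldl_skip : ∀ (tbl : List (String × String)) (pre x : List Char),
    (∀ kv ∈ tbl, kv.1.toList.head? = some '<') → (∀ c ∈ pre, c ≠ '<') →
    tbl.foldl pvStep (pre ++ x) = pre ++ tbl.foldl pvStep x := by
  intro tbl
  induction tbl with
  | nil => simp
  | cons q tbl' ih =>
    intro pre x hh hpre
    simp only [List.foldl_cons]
    rw [show pvStep (pre ++ x) q = pre ++ pvStep x q from
      pvRepC_skip _ (hh q (by simp)) pre x hpre]
    exact ih pre (pvStep x q) (fun kv hkv => hh kv (by simp [hkv])) hpre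

-- when the key of p ∈ tbl starts the string, the fold replaces it by p's symbol
theorem pvFoldl_match : ∀ (tbl : List (String × String)) (p : String × String) (x : List Char),
    p ∈ tbl →
    (∀ kv ∈ tbl, kv.1.toList ≠ []) →
    (∀ kv ∈ tbl, kv.1.toList.head? = some '<') →
    (∀ kv ∈ tbl, ∀ c ∈ kv.1.toList.drop 1, c ≠ '<') →
    (∀ kv ∈ tbl, ∀ c ∈ kv.2.toList, c ≠ '<') →
    (∀ kv ∈ tbl, ∀ kv' ∈ tbl, kv ≠ kv' → ¬ kv.1.toList <+: kv'.1.toList) →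
    tbl.foldl pvStep (p.1.toList ++ x) = p.2.toList ++ tbl.foldl pvStep x := by
  intro tbl
  induction tbl with
  | nil => intro p x hp; simp at hp
  | cons q tbl' ih =>
    intro p x hp hne hh htl hsym hcmp
    simp only [List.foldl_cons]
    by_cases hqp : q = p
    · subst hqp
      rw [show pvStep (q.1.toList ++ x) q = q.2.toList ++ pvStep x q by
        unfold pvStep
        rw [pvRepC_match _ _ (hne q (by simp)) (List.prefix_append _ _), List.drop_left]]
      exact pvFoldl_skip tbl' q.2.toList (pvStep x q)
        (fun kv hkv => hh kv (by simp [hkv]))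
        (fun c hc => hsym q (by simp) c hc)
    · have hp' : p ∈ tbl' := by
        rcases List.mem_cons.mp hp with h | h
        · exact absurd h.symm hqp
        · exact h
      rw [show pvStep (p.1.toList ++ x) q = p.1.toList ++ pvStep x q by
        unfold pvStep
        exact pvRepC_token _ _ (hh q (by simp)) (hne p (by simp [hp']))
          (htl p (by simp [hp']))
          (pvNot_prefix_append
            (hcmp q (by simp) p (by simp [hp']) hqp)
            (hcmp p (by simp [hp']) q (by simp) (Ne.symm hqp)))]
      exact ih p (pvStep x q) hp'
        (fun kv hkv => hne kv (by simp [hkv]))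
        (fun kv hkv => hh kv (by simp [hkv]))
        (fun kv hkv => htl kv (by simp [hkv]))
        (fun kv hkv => hsym kv (by simp [hkv]))
        (fun kv hkv kv' hkv' => hcmp kv (by simp [hkv]) kv' (by simp [hkv']))

-- at an unmatched '<' the fold emits the '<' and continues
theorem pvFoldl_lt : ∀ (tbl : List (String × String)) (x : List Char),
    (∀ kv ∈ tbl, kv.1.toList ≠ []) →
    (∀ kv ∈ tbl, kv.1.toList.head? = some '<') →
    (∀ kv ∈ tbl, kv.2.toList ≠ []) →
    (∀ kv ∈ tbl, ∀ kv' ∈ tbl, ∀ c ∈ kv'.1.toList.drop 1, c ∉ kv.2.toList) →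
    (∀ kv ∈ tbl, ¬ kv.1.toList.drop 1 <+: x) →
    tbl.foldl pvStep ('<' :: x) = '<' :: tbl.foldl pvStep x := by
  intro tbl
  induction tbl with
  | nil => simp
  | cons q tbl' ih =>
    intro x hne hh hsne hcross hnp
    simp only [List.foldl_cons]
    have hq : ¬ q.1.toList <+: ('<' :: x) := by
      intro h
      cases hq1 : q.1.toList with
      | nil => exact hne q (by simp) hq1
      | cons o os =>
        rw [hq1] at h
        obtain ⟨ho, hos⟩ := List.cons_prefix_cons.mp h
        exact hnp q (by simp) (by simpa [hq1] using hos)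
    rw [show pvStep ('<' :: x) q = '<' :: pvStep x q from pvRepC_nomatch _ hq]
    exact ih (pvStep x q)
      (fun kv hkv => hne kv (by simp [hkv]))
      (fun kv hkv => hh kv (by simp [hkv]))
      (fun kv hkv => hsne kv (by simp [hkv]))
      (fun kv hkv kv' hkv' => hcross kv (by simp [hkv]) kv' (by simp [hkv']))
      (fun kv hkv h => hnp kv (by simp [hkv])
        (pvRepC_prefix_rev (hne q (by simp)) (hsne q (by simp)) x _
          (fun c hc => hcross q (by simp) kv (by simp [hkv]) c hc) h))

-- main invariant: the eight-pass fold equals the single scan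
theorem pvFold_eq_scan : ∀ (x : List Char), pvItemsB.foldl pvStep x = pvScanB x := by
  intro x
  induction hx : x.length using Nat.strong_induction_on generalizing x with
  | _ n ih =>
  subst hx
  cases x with
  | nil =>
    rw [show pvScanB [] = [] from by rw [pvScanB]]
    have : ∀ tbl : List (String × String), tbl.foldl pvStep [] = [] := by
      intro tbl
      induction tbl with
      | nil => rfl
      | cons q tbl' iht => simpa [pvStep, pvRepC_nil] using iht
    exact this pvItemsB
  | cons c t =>
    rw [pvScanB]
    cases hf : pvItemsB.find? (fun kv => kv.1.toList.isPrefixOf (c :: t)) with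
    | some kv =>
      have hmem : kv ∈ pvItemsB := List.mem_of_find?_eq_some hf
      have hpre : kv.1.toList <+: (c :: t) := by
        have hb := List.find?_some hf
        simpa [List.isPrefixOf_iff_prefix] using hb
      obtain ⟨rest, hrest⟩ := hpre
      have hklen : 1 ≤ kv.1.toList.length := pvItemsB_key_len kv hmem
      have hdrop : (c :: t).drop kv.1.toList.length = rest := by
        rw [← hrest, List.drop_left]
      show List.foldl pvStep (c :: t) pvItemsB
          = kv.2.toList ++ pvScanB ((c :: t).drop kv.1.toList.length)
      rw [hdrop, ← hrest]
      rw [pvFoldl_match pvItemsB kv rest hmem pvFact_key_ne pvFact_key_head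
        pvFact_key_tail pvFact_sym_no_lt pvFact_cmp]
      congr 1
      apply ih rest.length _ rest rfl
      have : (c :: t).length = kv.1.toList.length + rest.length := by
        rw [← hrest, List.length_append]
      simp at this hklen ⊢
      omega
    | none =>
      show List.foldl pvStep (c :: t) pvItemsB = c :: pvScanB t
      have hnm : ∀ kv ∈ pvItemsB, ¬ kv.1.toList <+: (c :: t) := by
        intro kv hkv h
        have := List.find?_eq_none.mp hf kv hkv
        simp [List.isPrefixOf_iff_prefix] at this
        exact this h
      have iht : pvItemsB.foldl pvStep t = pvScanB t :=
        ih t.length (by simp) t rfl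
      by_cases hc : c = '<'
      · subst hc
        rw [pvFoldl_lt pvItemsB t pvFact_key_ne pvFact_key_head pvFact_sym_ne pvFact_cross]
        · rw [iht]
        · intro kv hkv h
          apply hnm kv hkv
          cases hk : kv.1.toList with
          | nil => exact absurd hk (pvFact_key_ne kv hkv)
          | cons o os =>
            have : o = '<' := by
              have := pvFact_key_head kv hkv
              rw [hk] at this; simpa using this
            subst this
            exact List.cons_prefix_cons.mpr ⟨rfl, by simpa [hk] using h⟩
      · rw [show (c :: t) = [c] ++ t from rfl,
          pvFoldl_skip pvItemsB [c] t pvFact_key_head (by simpa using hc), iht]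
        simp

-- port A's string fold, seen on the char lists
theorem pvFoldA_toList : ∀ (tbl : List (String × String)) (s : String),
    (tbl.foldl (fun processed kv => PySem.Str.replace processed kv.1 kv.2) s).toList
      = tbl.foldl (fun l kv => PySem.Chars.replace l kv.1.toList kv.2.toList) s.toList := by
  intro tbl
  induction tbl with
  | nil => intro s; rfl
  | cons q tbl' ih =>
    intro s
    simp only [List.foldl_cons]
    rw [ih, PySem.Str.toList_replace]

-- ===== VERDICT (by name: the statement is the Claim_ definition above) =====
theorem process_keyboard_content_py_spec : Claim_equal_process_keyboard_content_py := by
  intro content _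
  unfold Spec_process_keyboard_content_py process_keyboard_content_py process_keyboard_content_py_alt
  have hitems : pvSpecialKeys = pvItemsB := rfl
  rw [hitems]
  have htl : (pvItemsB.foldl (fun processed kv => PySem.Str.replace processed kv.1 kv.2) content).toList
      = pvScanB content.toList := by
    rw [pvFoldA_toList]
    rw [PySem.List.foldl_congr_mem pvItemsB _ pvStep content.toList
      (fun acc kv hkv => pvReplace_eq acc kv.1.toList kv.2.toList (pvFact_key_ne kv hkv))]
    exact pvFold_eq_scan content.toList
  rw [← htl, String.ofList_toList]
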